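-- pv_equiv track=rewrite | github.com/MinHyeouk/Algorithm-Study | 28. 폰켓몬/solotion.py | solution
-- ===== SOURCE A (Python) =====
-- def solution(nums):
--     answer = 0
--     a = len(nums)//2
--     b = list(set(nums))
--     for i in b:
--         if answer < a:
--             answer += 1
--     return answer
-- ===== SOURCE B (Python) =====
-- def solution(nums):
--     return min(len(set(nums)), len(nums) // 2)
-- ===== Notes on version B (the rewrite author's own statement) =====
-- stated objective: simpler
-- what changed: Replaced the capped counting loop over the set's elements with the closed form min(len(set(nums)), len(nums)//2).
import Mathlib
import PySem

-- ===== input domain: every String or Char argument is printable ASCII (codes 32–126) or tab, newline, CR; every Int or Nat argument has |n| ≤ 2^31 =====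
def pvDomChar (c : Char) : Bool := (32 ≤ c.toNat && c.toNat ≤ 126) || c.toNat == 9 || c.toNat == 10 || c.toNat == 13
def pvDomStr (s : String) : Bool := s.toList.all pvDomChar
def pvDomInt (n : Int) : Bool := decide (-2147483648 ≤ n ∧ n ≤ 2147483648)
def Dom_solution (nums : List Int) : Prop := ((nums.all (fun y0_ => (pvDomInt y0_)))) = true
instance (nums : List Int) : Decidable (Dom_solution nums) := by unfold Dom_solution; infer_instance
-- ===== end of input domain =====

-- ===== PORT A =====
-- B replaces A's capped counting loop with the closed form min(|set(nums)|, len//2); same values everywhere.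
def solution (nums : List Int) : Int :=
  let answer : Int := 0
  let a : Int := PySem.Int.floordiv (nums.length : Int) 2
  let b : List Int := PySem.Set.ofList nums
  b.foldl (fun answer _i => if answer < a then answer + 1 else answer) answer

-- ===== PORT B =====
def solution_alt (nums : List Int) : Int :=
  min ((PySem.Set.ofList nums).length : Int) (PySem.Int.floordiv (nums.length : Int) 2)

-- ===== PRECONDITION & SPEC =====
def Spec_solution (nums : List Int) (out : Int) : Prop := out = solution_alt nums
instance (nums : List Int) (out : Int) : Decidable (Spec_solution nums out) := by unfold Spec_solution; infer_instance

-- ===== CLAIM (what is proved, stated in full; the proofs are below) =====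
def Claim_equal_solution : Prop := ∀ (nums : List Int), Dom_solution nums → Spec_solution nums (solution nums)

-- ===== LEMMAS AND PROOFS =====

-- ===== VERDICT (by name: the statement is the Claim_ definition above) =====
theorem foldl_cap (l : List Int) (a ans : Int) (h : ans ≤ a) :
    l.foldl (fun answer (_i : Int) => if answer < a then answer + 1 else answer) ans
      = min (ans + (l.length : Int)) a := by
  induction l generalizing ans with
  | nil => simp; omega
  | cons x xs ih =>
    simp only [List.foldl_cons, List.length_cons]
    by_cases hlt : ans < a
    · rw [if_pos hlt, ih (ans + 1) (by omega)]; push_cast; omega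
    · rw [if_neg hlt, ih ans h]; push_cast; omega

theorem solution_spec : Claim_equal_solution := by
  intro nums _
  unfold Spec_solution solution solution_alt
  simp only []
  have h0 : (0:Int) ≤ PySem.Int.floordiv (nums.length : Int) 2 := by
    rw [PySem.Int.floordiv_eq_ediv_of_pos (by omega)]
    exact Int.ediv_nonneg (by positivity) (by omega)
  rw [foldl_cap _ _ _ h0]
  omega
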